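-- pv_equiv track=rewrite | github.com/KocoplechevaOlga/Education_Py | Lesson5/Task5.2.py | SertNums
-- ===== SOURCE A (Python) =====
-- def SertNums (ls):
--     n = []
--     for i in range(len(ls)):
--         t = ls[i]
--         t_list = [t]
--         for j in range(i+1, len(ls)):
--             if ls[j] > t:
--                 t = ls[j]
--                 t_list.append(t)
--         if len(t_list) > 1:
--             n.append(t_list)
--     return n
-- ===== SOURCE B (Python) =====
-- def SertNums(ls):
--     # Right-to-left monotonic stack: after processing the suffix starting at i,
--     # the stack (read top-to-bottom) IS the record-maxima chain starting at i.
--     res = []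
--     stack = []  # chain of current suffix, stored with its smallest element (the start) on top
--     for x in reversed(ls):
--         while stack and stack[-1] <= x:
--             stack.pop()
--         stack.append(x)
--         if len(stack) > 1:
--             res.append(stack[::-1])
--     res.reverse()
--     return res
-- ===== Notes on version B (the rewrite author's own statement) =====
-- stated objective: faster
-- what changed: Replaced A's per-start-index rescan of the whole remaining list by a single right-to-left pass with a monotonic stack whose contents are exactly the record-maxima chain of the current suffix.
import Mathlib
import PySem

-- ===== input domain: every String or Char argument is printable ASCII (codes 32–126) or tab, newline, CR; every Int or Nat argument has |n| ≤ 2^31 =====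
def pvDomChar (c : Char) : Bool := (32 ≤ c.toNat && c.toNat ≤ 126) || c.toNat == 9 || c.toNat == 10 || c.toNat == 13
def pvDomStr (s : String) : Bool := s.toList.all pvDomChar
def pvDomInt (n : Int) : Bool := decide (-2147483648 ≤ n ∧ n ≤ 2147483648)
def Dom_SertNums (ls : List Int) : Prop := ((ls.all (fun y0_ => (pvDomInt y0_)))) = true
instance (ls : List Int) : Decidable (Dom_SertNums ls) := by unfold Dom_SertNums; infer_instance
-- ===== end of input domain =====

-- B replaces A's per-index rescans by one right-to-left monotonic-stack pass (objective: faster).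

-- ===== PORT A =====
-- A's inner loop: scan the rest of the list keeping the running maximum t,
-- appending each new strict record.
def recScan (t : Int) : List Int → List Int
  | [] => []
  | x :: xs => if x > t then x :: recScan x xs else recScan t xs

-- A's outer loop over the start index i (here: structural recursion over the list,
-- the suffix after position i being xs).
def SertNums : List Int → List (List Int)
  | [] => []
  | x :: xs =>
      let tList := x :: recScan x xs
      if tList.length > 1 then tList :: SertNums xs else SertNums xs

-- ===== PORT B =====
-- B's loop body: pop stack entries ≤ x (while stack and stack[-1] <= x: pop),
-- push x, and record the chain when it is longer than 1. The Python stack is kept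
-- with its top at the end; here the top is the head, so stack = the chain itself
-- (Python records stack[::-1]). Iterating over reversed(ls) threading the state and
-- consing the recorded chains (Python appends then reverses res) is the foldr below.
def altStep (x : Int) (p : List Int × List (List Int)) : List Int × List (List Int) :=
  let s := x :: p.1.dropWhile (fun v => v ≤ x)
  (s, if s.length > 1 then s :: p.2 else p.2)

def SertNums_alt (ls : List Int) : List (List Int) :=
  (ls.foldr altStep ([], [])).2

-- ===== PRECONDITION & SPEC =====
def Spec_SertNums (ls : List Int) (out : List (List Int)) : Prop := out = SertNums_alt ls
instance (ls : List Int) (out : List (List Int)) : Decidable (Spec_SertNums ls out) := by unfold Spec_SertNums; infer_instance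

-- ===== CLAIM (what is proved, stated in full; the proofs are below) =====
def Claim_equal_SertNums : Prop := ∀ (ls : List Int), Dom_SertNums ls → Spec_SertNums ls (SertNums ls)

-- ===== LEMMAS AND PROOFS =====

-- the record-maxima chain of a whole list (B's stack invariant value)
def chainOf : List Int → List Int
  | [] => []
  | x :: xs => x :: recScan x xs

theorem dropWhile_recScan (zs : List Int) : ∀ (x y : Int), y ≤ x →
    (recScan y zs).dropWhile (fun v => v ≤ x) = recScan x zs := by
  induction zs with
  | nil => intro x y _; simp [recScan]
  | cons z zs ih =>
      intro x y hyx
      by_cases hzy : z > y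
      · by_cases hzx : z > x
        · simp [recScan, hzy, hzx, not_le.mpr hzx]
        · simp only [recScan, if_pos hzy, if_neg hzx, List.dropWhile]
          rw [decide_eq_true (not_lt.mp hzx)]
          exact ih x z (not_lt.mp hzx)
      · have hzx : ¬ z > x := fun h => hzy (lt_of_le_of_lt hyx h)
        simp only [recScan, if_neg hzy, if_neg hzx]
        exact ih x y hyx

theorem dropWhile_chainOf (x : Int) (xs : List Int) :
    (chainOf xs).dropWhile (fun v => v ≤ x) = recScan x xs := by
  cases xs with
  | nil => simp [chainOf, recScan]
  | cons y ys =>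
      by_cases hyx : y > x
      · simp [chainOf, recScan, hyx, not_le.mpr hyx]
      · simp only [chainOf, recScan, if_neg hyx, List.dropWhile]
        rw [decide_eq_true (not_lt.mp hyx)]
        exact dropWhile_recScan ys x y (not_lt.mp hyx)

theorem foldr_invariant (ls : List Int) :
    ls.foldr altStep ([], []) = (chainOf ls, SertNums ls) := by
  induction ls with
  | nil => simp [chainOf, SertNums]
  | cons x xs ih =>
      simp only [List.foldr, ih, altStep, dropWhile_chainOf]
      rfl

-- ===== VERDICT (by name: the statement is the Claim_ definition above) =====
theorem SertNums_spec : Claim_equal_SertNums := by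
  intro ls _
  unfold Spec_SertNums SertNums_alt
  rw [foldr_invariant]
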